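-- pv_equiv track=rewrite | github.com/kdelwat/Onset | engine/parse.py | valid_subword
-- ===== SOURCE A (Python) =====
-- def valid_subword(subword, segment_strings, diacritic_strings):
--     '''Determines whether a string is a valid IPA segment.'''
--
--     # If it's a simple IPA sequence, return True
--     if subword in segment_strings:
--         return True
--
--     # Iterate through the string, slicing at each index. If the first part is
--     # an IPA sequence and the second half is entirely made up of diacritics,
--     # it's valid.
--     for i in range(1, len(subword)):
--         if subword[:i] in segment_strings and all([x in diacritic_strings
--                                                       for x in subword[i:]]):
--             return True
--     else:
--         return False
-- ===== SOURCE B (Python) =====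
-- def valid_subword(subword, segment_strings, diacritic_strings):
--     '''Determines whether a string is a valid IPA segment.'''
--     segs = set(segment_strings)
--     if subword in segs:
--         return True
--     dia = set(diacritic_strings)
--     n = len(subword)
--     # one backward pass: t = smallest index such that subword[t:] is all diacritics
--     t = n
--     while t > 0 and subword[t - 1] in dia:
--         t -= 1
--     # any split point i >= t (and 1 <= i < n) with an IPA prefix makes it valid
--     for i in range(max(t, 1), n):
--         if subword[:i] in segs:
--             return True
--     return False
-- ===== Notes on version B (the rewrite author's own statement) =====
-- stated objective: faster
-- what changed: Instead of re-scanning the suffix with all() at every split point against the diacritic list, B does one backward pass to find the all-diacritic suffix threshold t, hashes both lists into sets once, and only tests prefixes at split points >= t.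
import Mathlib
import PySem

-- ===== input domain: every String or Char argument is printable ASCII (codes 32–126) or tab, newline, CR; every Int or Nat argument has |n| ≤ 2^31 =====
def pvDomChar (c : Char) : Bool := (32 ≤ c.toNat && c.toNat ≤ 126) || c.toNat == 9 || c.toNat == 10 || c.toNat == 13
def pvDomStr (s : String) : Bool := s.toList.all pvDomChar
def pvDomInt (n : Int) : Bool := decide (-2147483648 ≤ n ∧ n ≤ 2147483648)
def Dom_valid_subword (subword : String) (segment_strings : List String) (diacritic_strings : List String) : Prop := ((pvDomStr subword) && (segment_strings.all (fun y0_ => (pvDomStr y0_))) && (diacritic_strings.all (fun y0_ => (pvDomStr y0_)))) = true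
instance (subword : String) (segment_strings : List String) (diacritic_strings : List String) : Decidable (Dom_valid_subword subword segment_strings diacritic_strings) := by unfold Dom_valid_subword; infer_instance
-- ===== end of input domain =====

-- B replaces A's per-split rescan of the suffix by one backward pass that finds the
-- all-diacritic suffix threshold, then tests only the prefixes at or beyond it (alternative/faster).

-- ===== PORT A =====
-- literal port of A: whole word first, then every split point i in range(1, len(subword)):
-- prefix subword[:i] against segment_strings, every char of subword[i:] against diacritic_strings
def valid_subword (subword : String) (segment_strings : List String) (diacritic_strings : List String) : Bool :=
  if segment_strings.contains subword then true
  else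
    (PySem.List.pyRange 1 (PySem.Str.len subword) 1).any (fun i =>
      segment_strings.contains (String.ofList (PySem.List.slice subword.toList none (some i))) &&
      (PySem.List.slice subword.toList (some i) none).all
        (fun c => diacritic_strings.contains (String.ofList [c])))

-- ===== PORT B =====
-- Source B's while loop scans from the end while the char is a diacritic: recursion over the
-- reversed list giving the length of that trailing run, so the threshold t = n - run
def pvDiaRun (p : Char → Bool) : List Char → Nat
  | [] => 0
  | c :: rest => if p c then pvDiaRun p rest + 1 else 0

def valid_subword_alt (subword : String) (segment_strings : List String) (diacritic_strings : List String) : Bool :=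
  let segS := PySem.Set.ofList segment_strings
  if PySem.Set.contains segS subword then true
  else
    let diaS := PySem.Set.ofList diacritic_strings
    let cs := subword.toList
    let n := cs.length
    let t := n - pvDiaRun (fun c => PySem.Set.contains diaS (String.ofList [c])) cs.reverse
    (List.range' (max t 1) (n - max t 1)).any
      (fun i => PySem.Set.contains segS (String.ofList (cs.take i)))

-- ===== PRECONDITION & SPEC =====
def Spec_valid_subword (subword : String) (segment_strings : List String) (diacritic_strings : List String) (out : Bool) : Prop := out = valid_subword_alt subword segment_strings diacritic_strings
instance (subword : String) (segment_strings : List String) (diacritic_strings : List String) (out : Bool) : Decidable (Spec_valid_subword subword segment_strings diacritic_strings out) := by unfold Spec_valid_subword; infer_instance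

-- ===== CLAIM (what is proved, stated in full; the proofs are below) =====
def Claim_equal_valid_subword : Prop := ∀ (subword : String) (segment_strings : List String) (diacritic_strings : List String), Dom_valid_subword subword segment_strings diacritic_strings → Spec_valid_subword subword segment_strings diacritic_strings (valid_subword subword segment_strings diacritic_strings)

-- ===== LEMMAS AND PROOFS =====

-- membership in set(l) is membership in l
theorem pv_contains_ofList {l : List String} {x : String} :
    PySem.Set.contains (PySem.Set.ofList l) x = l.contains x := by
  simp [pysem]

theorem pvDiaRun_le (p : Char → Bool) (rs : List Char) : pvDiaRun p rs ≤ rs.length := by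
  induction rs with
  | nil => simp [pvDiaRun]
  | cons c rest ih => simp [pvDiaRun]; split_ifs <;> omega

-- a prefix of rs is all-p exactly when it is no longer than the leading all-p run
theorem pv_take_all (p : Char → Bool) (rs : List Char) (m : Nat) (hm : m ≤ rs.length) :
    ((rs.take m).all p = true) ↔ m ≤ pvDiaRun p rs := by
  induction rs generalizing m with
  | nil => simp_all [pvDiaRun]
  | cons c rest ih =>
    cases m with
    | zero => simp
    | succ m' =>
      simp only [List.take_succ_cons, List.all_cons, Bool.and_eq_true, pvDiaRun]
      by_cases hc : p c
      · simp only [hc, if_pos, true_and]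
        rw [ih m' (by simpa using hm)]
        omega
      · simp [hc]

theorem pv_drop_all (p : Char → Bool) (cs : List Char) (i : Nat) :
    ((cs.drop i).all p) = ((cs.reverse.take (cs.length - i)).all p) := by
  rw [← List.reverse_drop, List.all_reverse]

-- the loops agree: A's split-point scan equals B's scan from the threshold
theorem pv_main_any (cs : List Char) (segP : String → Bool) (diaP : Char → Bool) :
    (PySem.List.pyRange 1 (cs.length : Int) 1).any (fun i =>
        segP (String.ofList (PySem.List.slice cs none (some i))) &&
        (PySem.List.slice cs (some i) none).all diaP)
    =
    (List.range' (max (cs.length - pvDiaRun diaP cs.reverse) 1)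
        (cs.length - max (cs.length - pvDiaRun diaP cs.reverse) 1)).any
        (fun i => segP (String.ofList (cs.take i))) := by
  have hrun : pvDiaRun diaP cs.reverse ≤ cs.length := by
    simpa using pvDiaRun_le diaP cs.reverse
  rw [Bool.eq_iff_iff, List.any_eq_true, List.any_eq_true]
  constructor
  · rintro ⟨i, hmem, hp⟩
    rw [PySem.List.mem_pyRange_one] at hmem
    obtain ⟨h1, h2⟩ := hmem
    have hk : i = ((i.toNat : Nat) : Int) := by omega
    set k := i.toNat with hkdef
    rw [hk, PySem.List.slice_to_natCast, PySem.List.slice_from_natCast,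
        Bool.and_eq_true] at hp
    obtain ⟨hseg, hall⟩ := hp
    rw [pv_drop_all, pv_take_all _ _ _ (by simp)] at hall
    refine ⟨k, ?_, hseg⟩
    rw [List.mem_range'_1]
    omega
  · rintro ⟨k, hmem, hp⟩
    rw [List.mem_range'_1] at hmem
    refine ⟨(k : Int), ?_, ?_⟩
    · rw [PySem.List.mem_pyRange_one]; omega
    · rw [PySem.List.slice_to_natCast, PySem.List.slice_from_natCast, Bool.and_eq_true]
      refine ⟨by simpa using hp, ?_⟩
      rw [pv_drop_all, pv_take_all _ _ _ (by simp)]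
      omega

-- ===== VERDICT (by name: the statement is the Claim_ definition above) =====
theorem valid_subword_spec : Claim_equal_valid_subword := by
  intro s segs dia _
  unfold Spec_valid_subword valid_subword valid_subword_alt
  simp only [pv_contains_ofList]
  split_ifs with h
  · rfl
  · rw [PySem.Str.len_eq]
    exact pv_main_any s.toList _ _
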